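-- pv_equiv track=rewrite | github.com/pioneersoftmen/codeforces_solutions | make_equal_again.py | solve
-- ===== SOURCE A (Python) =====
-- from collections import deque
--
-- def solve(n, a):
--     if n == 1:
--         return 0
--     if n == 2:
--         if a[0] == a[1]:
--             return 0
--         return 1
--     old = a[0]
--     orqa = a[-1]
--
--     if old != orqa:
--         q1 = deque(a)
--         q2 = deque(a)
--         while q1:
--             if len(q1) > 0 and q1[0] == old:
--                 q1.popleft()
--             else: break
--         while q2:
--             if len(q2) > 0 and q2[-1] == orqa:
--                 q2.pop()
--             else: break
--         return min(len(q1), len(q2))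
--     else:
--         q = deque(a)
--         while len(q) > 0 and q[0] == old:
--             if len(q) > 0 and q[0] == old:
--                 q.popleft()
--             else: break
--         while len(q) > 0 and q[-1] == orqa:
--             if len(q) > 0 and q[-1] == orqa:
--                 q.pop()
--             else:
--                 break
--         return len(q)
-- ===== SOURCE B (Python) =====
-- def solve(n, a):
--     if n == 1:
--         return 0
--     if n == 2:
--         return 0 if a[0] == a[1] else 1
--     m = len(a)
--     first, last = a[0], a[-1]
--     p = 0
--     for x in a:
--         if x != first:
--             break
--         p += 1
--     s = 0
--     for x in reversed(a):
--         if x != last: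
--             break
--         s += 1
--     if first != last:
--         return min(m - p, m - s)
--     return max(0, m - p - s)
-- ===== Notes on version B (the rewrite author's own statement) =====
-- stated objective: simpler
-- what changed: Replaces the two/three deque-popping loops with duplicated conditions by two run-length counts (leading run of a[0], trailing run of a[-1]) combined by a closed formula: min(n-p, n-s) when the ends differ, max(0, n-p-s) when they are equal.
import Mathlib
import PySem

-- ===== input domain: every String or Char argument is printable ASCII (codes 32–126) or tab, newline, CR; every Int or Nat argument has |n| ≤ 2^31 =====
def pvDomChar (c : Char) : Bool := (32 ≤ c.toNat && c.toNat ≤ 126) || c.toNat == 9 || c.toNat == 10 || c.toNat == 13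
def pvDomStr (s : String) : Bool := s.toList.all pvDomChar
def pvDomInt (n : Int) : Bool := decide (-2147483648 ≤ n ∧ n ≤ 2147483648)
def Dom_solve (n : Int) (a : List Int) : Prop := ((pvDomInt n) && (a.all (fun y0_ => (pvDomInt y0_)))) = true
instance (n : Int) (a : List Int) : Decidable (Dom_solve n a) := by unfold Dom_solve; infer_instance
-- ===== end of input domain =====

-- B replaces A's deque-popping loops by two run-length counts combined with a closed
-- formula (min / max); same O(n) cost, plainly shorter.

-- ===== PORT A =====
-- A's 'while q: pop left while q[0] == old' loops
def popFrontWhile (v : Int) : List Int → List Int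
  | [] => []
  | x :: xs => if x = v then popFrontWhile v xs else x :: xs

-- A's 'while q: pop right while q[-1] == orqa' loops
def popBackWhile (v : Int) (q : List Int) : List Int :=
  match h : q.getLast? with
  | none => q
  | some x => if x = v then popBackWhile v q.dropLast else q
termination_by q.length
decreasing_by
  have hq : q ≠ [] := by intro hq; simp [hq] at h
  have : 0 < q.length := List.length_pos_of_ne_nil hq
  simp [List.length_dropLast]; omega

def solve (n : Int) (a : List Int) : Int :=
  if n = 1 then 0
  else if n = 2 then
    if a.getD 0 0 = a.getD 1 0 then 0 else 1
  else
    let old := a.headI          -- a[0]   (Pre_ guarantees a ≠ [])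
    let orqa := a.getLastD 0    -- a[-1]
    if old ≠ orqa then
      ((min (popFrontWhile old a).length (popBackWhile orqa a).length : Nat) : Int)
    else
      (((popBackWhile orqa (popFrontWhile old a)).length : Nat) : Int)

-- ===== PORT B =====
-- Source B's 'for x in a: break on mismatch' run-length counter
def runLen (v : Int) : List Int → Nat
  | [] => 0
  | x :: xs => if x = v then 1 + runLen v xs else 0

def solve_alt (n : Int) (a : List Int) : Int :=
  if n = 1 then 0
  else if n = 2 then
    if a.getD 0 0 = a.getD 1 0 then 0 else 1
  else
    let m : Int := a.length
    let first := a.headI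
    let last := a.getLastD 0
    let p : Int := runLen first a
    let s : Int := runLen last a.reverse
    if first ≠ last then min (m - p) (m - s)
    else max 0 (m - p - s)

-- ===== PRECONDITION & SPEC =====
-- Pre_ excludes exactly the inputs where Python A raises IndexError:
-- n = 2 with fewer than two elements, and any other n ≠ 1 with an empty list.
def Pre_solve (n : Int) (a : List Int) : Prop :=
  n = 1 ∨ (n = 2 ∧ 2 ≤ a.length) ∨ (n ≠ 1 ∧ n ≠ 2 ∧ a ≠ [])
instance (n : Int) (a : List Int) : Decidable (Pre_solve n a) := by unfold Pre_solve; infer_instance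

def pvWitness_solve : Int × List Int := (4, [3, 3, 1, 3])

def Spec_solve (n : Int) (a : List Int) (out : Int) : Prop := out = solve_alt n a
instance (n : Int) (a : List Int) (out : Int) : Decidable (Spec_solve n a out) := by unfold Spec_solve; infer_instance

-- ===== CLAIM (what is proved, stated in full; the proofs are below) =====
def Claim_equal_solve : Prop := ∀ (n : Int) (a : List Int), Dom_solve n a → Pre_solve n a → Spec_solve n a (solve n a)

-- ===== LEMMAS AND PROOFS =====

theorem runLen_le (v : Int) (l : List Int) : runLen v l ≤ l.length := by
  induction l with
  | nil => simp [runLen]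
  | cons x xs ih => simp only [runLen, List.length_cons]; split <;> omega

theorem runLen_eq_length (v : Int) (l : List Int) (h : runLen v l = l.length) :
    ∀ x ∈ l, x = v := by
  induction l with
  | nil => simp
  | cons x xs ih =>
    by_cases hx : x = v
    · intro y hy
      rcases List.mem_cons.mp hy with rfl | hy'
      · exact hx
      · have h' : runLen v xs = xs.length := by
          simp [runLen, hx] at h; omega
        exact ih h' y hy'
    · simp [runLen, hx] at h

theorem runLen_all (v : Int) (l : List Int) (h : ∀ x ∈ l, x = v) :
    runLen v l = l.length := by
  induction l with
  | nil => rfl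
  | cons x xs ih =>
    have hx : x = v := h x (by simp)
    simp [runLen, hx, ih (fun y hy => h y (by simp [hy]))]
    omega

theorem popFront_eq_drop (v : Int) (l : List Int) :
    popFrontWhile v l = l.drop (runLen v l) := by
  induction l with
  | nil => rfl
  | cons x xs ih =>
    by_cases hx : x = v
    · simp [popFrontWhile, runLen, hx, ih, Nat.add_comm]
    · simp [popFrontWhile, runLen, hx]

theorem take_runLen (v : Int) (l : List Int) :
    l.take (runLen v l) = List.replicate (runLen v l) v := by
  induction l with
  | nil => rfl
  | cons x xs ih =>
    by_cases hx : x = v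
    · simp [runLen, hx, Nat.add_comm 1, List.take_succ_cons, List.replicate_succ, ih]
    · simp [runLen, hx]

theorem runLen_append_lt (v : Int) (l t : List Int) (h : runLen v l < l.length) :
    runLen v (l ++ t) = runLen v l := by
  induction l with
  | nil => simp at h
  | cons x xs ih =>
    by_cases hx : x = v
    · subst hx
      have h' : runLen x xs < xs.length := by
        simp [runLen] at h; omega
      simp [runLen, ih h']
    · simp [runLen, hx]

theorem popFront_head_ne (v : Int) (l : List Int) (h : popFrontWhile v l ≠ []) :
    ∃ y ys, popFrontWhile v l = y :: ys ∧ y ≠ v := by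
  induction l with
  | nil => simp [popFrontWhile] at h
  | cons x xs ih =>
    by_cases hx : x = v
    · simp only [popFrontWhile, if_pos hx] at h ⊢
      exact ih h
    · exact ⟨x, xs, by simp [popFrontWhile, hx], hx⟩

theorem popBack_eq (v : Int) (l : List Int) :
    popBackWhile v l.reverse = (popFrontWhile v l).reverse := by
  induction l with
  | nil => simp [popBackWhile, popFrontWhile]
  | cons x xs ih =>
    rw [List.reverse_cons, popBackWhile.eq_def]
    split
    · next heq => simp at heq
    · next z heq =>
      rw [List.getLast?_concat] at heq
      obtain rfl : x = z := by injection heq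
      by_cases hx : x = v
      · rw [if_pos hx, List.dropLast_concat, ih]
        simp [popFrontWhile, hx]
      · rw [if_neg hx]
        simp [popFrontWhile, hx]

theorem popBack_reverse (v : Int) (l : List Int) :
    popBackWhile v l = (popFrontWhile v l.reverse).reverse := by
  have := popBack_eq v l.reverse
  simpa using this

-- length of A's suffix-stripped list in terms of the trailing run length
theorem popBack_length (v : Int) (l : List Int) :
    (popBackWhile v l).length = l.length - runLen v l.reverse := by
  rw [popBack_reverse, List.length_reverse, popFront_eq_drop, List.length_drop,
    List.length_reverse]

-- the equal-ends branch: strip prefix then suffix = n - p - s (capped at 0 by Nat sub)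
theorem equal_branch (v : Int) (a : List Int) :
    ((popBackWhile v (popFrontWhile v a)).length : Int)
      = max 0 ((a.length : Int) - runLen v a - runLen v a.reverse) := by
  rw [popBack_length, popFront_eq_drop]
  have hple : runLen v a ≤ a.length := runLen_le v a
  by_cases hrest : a.drop (runLen v a) = []
  · -- everything was stripped by the prefix pass
    have hlen : a.length ≤ runLen v a := by
      have := List.length_drop (l := a) (i := runLen v a)
      rw [hrest] at this; simp at this; omega
    have hall : ∀ x ∈ a, x = v := runLen_eq_length v a (by omega)
    have hs : runLen v a.reverse = a.length := by
      have := runLen_all v a.reverse (fun x hx => hall x (by simpa using hx))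
      simpa using this
    rw [hrest]
    simp only [List.reverse_nil, List.length_nil]
    have h0 : runLen v (List.nil (α := Int)) = 0 := rfl
    rw [h0, hs]
    omega
  · -- a nonempty remainder whose head differs from v
    obtain ⟨y, ys, hrw, hy⟩ := popFront_head_ne v a (by rwa [popFront_eq_drop])
    rw [popFront_eq_drop] at hrw
    -- trailing run of the remainder is the trailing run of a
    have hsplit : a.reverse
        = (a.drop (runLen v a)).reverse ++ List.replicate (runLen v a) v := by
      conv_lhs => rw [← List.take_append_drop (runLen v a) a]
      rw [List.reverse_append, take_runLen]
      simp [List.reverse_replicate]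
    have hlt : runLen v (a.drop (runLen v a)).reverse
        < (a.drop (runLen v a)).reverse.length := by
      rcases Nat.lt_or_ge (runLen v (a.drop (runLen v a)).reverse)
          (a.drop (runLen v a)).reverse.length with h | h
      · exact h
      · exfalso
        have heq : runLen v (a.drop (runLen v a)).reverse
            = (a.drop (runLen v a)).reverse.length := le_antisymm (runLen_le _ _) h
        have hmem : y ∈ (a.drop (runLen v a)).reverse := by simp [hrw]
        exact hy (runLen_eq_length v _ heq y hmem)
    have hs : runLen v a.reverse = runLen v (a.drop (runLen v a)).reverse := by
      rw [hsplit, runLen_append_lt _ _ _ hlt]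
    rw [hs, List.length_drop]
    have h1 : runLen v (a.drop (runLen v a)).reverse ≤ a.length - runLen v a := by
      have := hlt; simp [List.length_reverse, List.length_drop] at this; omega
    omega

-- the unequal-ends branch lengths
theorem unequal_branch (v w : Int) (a : List Int) :
    ((min (popFrontWhile v a).length (popBackWhile w a).length : Nat) : Int)
      = min ((a.length : Int) - runLen v a) ((a.length : Int) - runLen w a.reverse) := by
  rw [popFront_eq_drop, List.length_drop, popBack_length]
  have h1 := runLen_le v a
  have h2 : runLen w a.reverse ≤ a.length := by
    have := runLen_le w a.reverse; simpa using this
  omega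

-- ===== VERDICT (by name: the statement is the Claim_ definition above) =====
theorem solve_spec : Claim_equal_solve := by
  intro n a _hdom hpre
  unfold Spec_solve solve solve_alt
  by_cases h1 : n = 1
  · simp [h1]
  · by_cases h2 : n = 2
    · simp [h1, h2]
    · simp only [if_neg h1, if_neg h2]
      by_cases hne : a.headI ≠ a.getLastD 0
      · simp only [if_pos hne]
        exact unequal_branch _ _ a
      · simp only [if_neg hne]
        rw [not_not] at hne
        rw [← hne, equal_branch]
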